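-- pv_equiv track=rewrite | github.com/deepakgouda/WHOIS-Data-Extractor | inference.py | convert_labels_to_json
-- ===== SOURCE A (Python) =====
-- from collections import defaultdict
--
-- def convert_labels_to_json(text, labels):
--     result = defaultdict(list)
--     for indx, label in enumerate(labels):
--         if label == "O":
--             continue
--         _, entity = label.split("-")
--         result[entity].append(text[indx])
--     result = {k: " ".join(v) for k, v in result.items()}
--     return result
-- ===== SOURCE B (Python) =====
-- def convert_labels_to_json(text, labels):
--     pairs = []
--     for token, label in zip(text, labels):
--         if label != "O":
--             _, entity = label.split("-")
--             pairs.append((entity, token))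
--     order = list(dict.fromkeys(e for e, _ in pairs))
--     return {e: " ".join(t for e2, t in pairs if e2 == e) for e in order}
-- ===== Notes on version B (the rewrite author's own statement) =====
-- stated objective: alternative
-- what changed: Instead of incrementally appending into a defaultdict while enumerating and indexing text, B zips text with labels into a flat (entity, token) pair list, dedups the entities with dict.fromkeys to fix the key order, and builds each joined value by filtering the pair list per entity.
import Mathlib
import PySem

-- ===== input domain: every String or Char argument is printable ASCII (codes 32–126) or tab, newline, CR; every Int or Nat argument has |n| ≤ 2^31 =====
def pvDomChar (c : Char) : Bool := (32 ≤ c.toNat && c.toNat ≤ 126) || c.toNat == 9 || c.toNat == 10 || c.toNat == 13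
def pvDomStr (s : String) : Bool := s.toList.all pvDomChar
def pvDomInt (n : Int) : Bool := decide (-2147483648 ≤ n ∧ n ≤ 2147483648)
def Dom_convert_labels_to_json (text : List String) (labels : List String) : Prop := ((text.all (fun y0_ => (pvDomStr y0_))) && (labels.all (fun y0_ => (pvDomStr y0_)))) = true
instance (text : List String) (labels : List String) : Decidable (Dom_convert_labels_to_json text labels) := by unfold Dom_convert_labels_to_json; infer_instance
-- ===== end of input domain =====

-- B replaces A's incremental defaultdict grouping by a flat zip-built (entity, token) pair list,
-- a deduped entity order and a per-entity filter+join (alternative decomposition, same results).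


-- ===== PORT A =====
-- `_, entity = label.split("-")`: the entity is parts[1] (Pre_ guarantees exactly two parts);
-- both Pythons contain this identical line, so both ports use this helper.
def pvEnt (label : String) : String :=
  (PySem.List.pyGet? ((PySem.Str.split? label "-").getD []) 1).getD ""

def convert_labels_to_json (text : List String) (labels : List String) : List (String × String) :=
  let result : PySem.Dict String (List String) :=
    (PySem.List.enumerate labels).foldl
      (fun d p =>
        if p.2 == "O" then d
        else d.modify (pvEnt p.2) [] (· ++ [(PySem.List.pyGet? text p.1).getD ""]))
      PySem.Dict.empty
  result.items.map (fun kv => (kv.1, PySem.Str.join " " kv.2))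

-- ===== PORT B =====
def convert_labels_to_json_alt (text : List String) (labels : List String) : List (String × String) :=
  let pairs : List (String × String) :=
    (text.zip labels).foldl
      (fun acc p => if p.2 == "O" then acc else acc ++ [(pvEnt p.2, p.1)]) []
  let order := PySem.List.dedup (pairs.map (·.1))
  order.map (fun e => (e, PySem.Str.join " " ((pairs.filter (fun q => q.1 == e)).map (·.2))))

-- ===== PRECONDITION & SPEC =====
-- Pre_ excludes exactly the inputs where A raises: a non-"O" label whose index is beyond the
-- end of text (IndexError) or that does not split into exactly two '-' parts (ValueError).
def Pre_convert_labels_to_json (text : List String) (labels : List String) : Prop :=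
  ∀ p ∈ labels.zipIdx, p.1 ≠ "O" →
    (p.2 < text.length ∧ ((PySem.Str.split? p.1 "-").getD []).length = 2)
instance (text : List String) (labels : List String) : Decidable (Pre_convert_labels_to_json text labels) := by unfold Pre_convert_labels_to_json; infer_instance

def pvWitness_convert_labels_to_json : List String × List String :=
  (["John", "lives", "here"], ["B-PER", "O", "B-LOC"])

def Spec_convert_labels_to_json (text : List String) (labels : List String) (out : List (String × String)) : Prop := out = convert_labels_to_json_alt text labels
instance (text : List String) (labels : List String) (out : List (String × String)) : Decidable (Spec_convert_labels_to_json text labels out) := by unfold Spec_convert_labels_to_json; infer_instance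

-- ===== CLAIM (what is proved, stated in full; the proofs are below) =====
def Claim_equal_convert_labels_to_json : Prop := ∀ (text : List String) (labels : List String), Dom_convert_labels_to_json text labels → Pre_convert_labels_to_json text labels → Spec_convert_labels_to_json text labels (convert_labels_to_json text labels)

-- ===== LEMMAS AND PROOFS =====

-- The two filtered-and-mapped (entity, token) pair lists coincide when every non-"O" label
-- has a token at its index (A reads text[i] by index, B zips text with labels).
lemma pv_pairs_bridge (labels : List String) : ∀ (text : List String) (s : Nat),
    (∀ i (h : i < labels.length), labels[i] ≠ "O" → s + i < text.length) →
    ((PySem.List.enumerate labels (s : Int)).filter (fun p => !(p.2 == "O"))).map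
        (fun p => (pvEnt p.2, (PySem.List.pyGet? text p.1).getD ""))
      = (((text.drop s).zip labels).filter (fun p => !(p.2 == "O"))).map
        (fun p => (pvEnt p.2, p.1)) := by
  induction labels with
  | nil => intro text s h; simp [PySem.List.enumerate_nil]
  | cons l ls ih =>
    intro text s h
    rw [PySem.List.enumerate_cons]
    have ihtail := ih text (s + 1)
      (by intro i hi hne; have := h (i+1) (by simpa) (by simpa using hne); omega)
    by_cases hO : l = "O"
    · subst hO
      by_cases hs : s < text.length
      · rw [List.drop_eq_getElem_cons hs]
        simp only [List.filter_cons, List.zip_cons_cons]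
        norm_num
        push_cast at ihtail ⊢
        convert ihtail using 3
      · have hnil : text.drop s = [] := List.drop_eq_nil_of_le (by omega)
        rw [hnil]
        simp only [List.zip_nil_left, List.filter_cons]
        norm_num
        intro a b hp
        rw [PySem.List.mem_enumerate_iff] at hp
        obtain ⟨k, hk, hab⟩ := hp
        have hb : b = ls[k] := congrArg Prod.snd hab
        subst hb
        by_contra hne
        have := h (k+1) (by simpa) (by simpa using hne)
        omega
    · have hs : s < text.length := by have := h 0 (by simp) (by simpa using hO); omega
      rw [List.drop_eq_getElem_cons hs]
      simp only [List.filter_cons, List.zip_cons_cons]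
      have hb : (!(l == "O")) = true := by simpa using hO
      simp only [hb, if_pos]
      simp only [List.map_cons]
      rw [PySem.List.pyGet?_natCast]
      have : text[s]?.getD "" = text[s] := by simp [List.getElem?_eq_getElem hs]
      rw [this]
      push_cast at ihtail ⊢
      rw [ihtail]

-- ===== VERDICT (by name: the statement is the Claim_ definition above) =====
theorem convert_labels_to_json_spec : Claim_equal_convert_labels_to_json := by
  intro text labels _ hpre
  unfold Spec_convert_labels_to_json convert_labels_to_json convert_labels_to_json_alt
  -- flip both conditionals so that the filter-shaped loop lemmas apply
  have hflipA : (fun (d : PySem.Dict String (List String)) (p : Int × String) =>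
      if p.2 == "O" then d
      else d.modify (pvEnt p.2) [] (· ++ [(PySem.List.pyGet? text p.1).getD ""]))
      = (fun d p => if !(p.2 == "O") then d.modify (pvEnt p.2) [] (· ++ [(PySem.List.pyGet? text p.1).getD ""]) else d) := by
    funext d p; cases hc : p.2 == "O" <;> simp [hc]
  have hflipB : (fun (acc : List (String × String)) (p : String × String) =>
      if p.2 == "O" then acc else acc ++ [(pvEnt p.2, p.1)])
      = (fun acc p => if !(p.2 == "O") then acc ++ [(pvEnt p.2, p.1)] else acc) := by
    funext acc p; cases hc : p.2 == "O" <;> simp [hc]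
  rw [hflipA, hflipB]
  simp only [PySem.List.foldl_if_eq_foldl_filter (p := fun p : Int × String => !(p.2 == "O")),
      PySem.List.foldl_append_if (p := fun p : String × String => !(p.2 == "O"))
        (f := fun p : String × String => (pvEnt p.2, p.1)), List.nil_append]
  -- A's dict loop is a loop over the (entity, token) pairs
  rw [← List.foldl_map (f := fun p : Int × String => (pvEnt p.2, (PySem.List.pyGet? text p.1).getD ""))
        (g := fun (d : PySem.Dict String (List String)) (q : String × String) => d.modify q.1 [] (· ++ [q.2]))]
  -- under Pre_, A's pair list is B's pair list
  have hidx : ∀ i (h : i < labels.length), labels[i] ≠ "O" → 0 + i < text.length := by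
    intro i hi hne
    have hmem : (labels[i], i) ∈ labels.zipIdx := by
      rw [List.mem_zipIdx_iff_getElem?]
      simp [List.getElem?_eq_getElem hi]
    have := hpre _ hmem hne
    omega
  have hbridge := pv_pairs_bridge labels text 0 hidx
  simp only [Int.natCast_zero, List.drop_zero] at hbridge
  rw [hbridge]
  set P := (((text.zip labels)).filter (fun p => !(p.2 == "O"))).map (fun p => (pvEnt p.2, p.1)) with hP
  -- characterise the dict built by the grouping loop: keys and per-key values
  have hnodup : (P.foldl (fun d q => d.modify q.1 [] (· ++ [q.2])) PySem.Dict.empty).keys.Nodup :=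
    PySem.Dict.nodup_keys_foldl_modify_key P Prod.fst [] (fun _ q => (· ++ [q.2])) PySem.Dict.empty
      (by simpa using PySem.Dict.nodup_keys_empty (κ := String) (ν := List String))
  rw [PySem.Dict.items_eq_map_keys _ hnodup []]
  rw [PySem.Dict.keys_foldl_modify_key P Prod.fst [] (fun _ q => (· ++ [q.2]))]
  rw [List.map_map]
  simp only [PySem.Dict.keys_empty, PySem.Set.update_nil_left, PySem.List.dedup_eq_ofList]
  apply List.map_congr_left
  intro k hk
  simp only [Function.comp]
  rw [PySem.Dict.getD_foldl_modify_append P PySem.Dict.empty k]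
  simp [PySem.Dict.getD_empty]
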